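-- pv_equiv track=rewrite | github.com/lebedev-ilia/AudioProcessor | src/gpu_optimizer.py | _can_batch_extractors
-- ===== SOURCE A (Python) =====
-- from typing import Dict, Any, List, Optional, Callable, Tuple, Union
--
-- def _can_batch_extractors(extractor_names: List[str]) -> bool:
--     """Check if multiple extractor types can be batched together."""
--     # Define compatible extractor groups
--     compatible_groups = [
--         {"spectral_extractor", "mfcc_extractor", "chroma_extractor"},
--         {"clap_extractor", "advanced_embeddings_extractor"},
--         {"asr_extractor"}
--     ]
--
--     for group in compatible_groups:
--         if all(name in group for name in extractor_names):
--             return True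
--
--     return False
-- ===== SOURCE B (Python) =====
-- from typing import Dict, Any, List, Optional, Callable, Tuple, Union
--
-- _GROUPS = [
--     ["spectral_extractor", "mfcc_extractor", "chroma_extractor"],
--     ["clap_extractor", "advanced_embeddings_extractor"],
--     ["asr_extractor"],
-- ]
--
-- def _can_batch_extractors(extractor_names: List[str]) -> bool:
--     """Check if multiple extractor types can be batched together."""
--     group_of = {name: i for i, group in enumerate(_GROUPS) for name in group}
--     current = None
--     for name in extractor_names:
--         gid = group_of.get(name)
--         if gid is None:
--             return False
--         if current is None:
--             current = gid
--         elif current != gid: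
--             return False
--     return True
-- ===== Notes on version B (the rewrite author's own statement) =====
-- stated objective: alternative
-- what changed: Replaced the per-group 'all names in group' nested scan with a reverse-lookup dict (name -> group id) built once, then a single pass over the names that fails fast on an unknown name or a second distinct group id.
import Mathlib
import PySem

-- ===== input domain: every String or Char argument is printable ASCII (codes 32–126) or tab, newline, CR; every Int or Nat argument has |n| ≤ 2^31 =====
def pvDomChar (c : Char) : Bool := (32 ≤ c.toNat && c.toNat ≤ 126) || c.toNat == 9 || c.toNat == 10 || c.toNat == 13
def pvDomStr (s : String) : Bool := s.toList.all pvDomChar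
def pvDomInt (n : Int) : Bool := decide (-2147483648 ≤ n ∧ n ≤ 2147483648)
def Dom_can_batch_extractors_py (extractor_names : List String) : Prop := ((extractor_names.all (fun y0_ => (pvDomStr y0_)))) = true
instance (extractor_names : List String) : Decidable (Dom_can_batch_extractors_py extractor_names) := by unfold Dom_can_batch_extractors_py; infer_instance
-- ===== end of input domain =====

-- B replaces A's per-group nested membership scan by a reverse-lookup dict and one pass over the names (alternative decomposition, same cost at g=3).

-- ===== PORT A =====
-- the three compatible groups, as Python sets
def pvGroupsA : List (PySem.Set String) :=
  [PySem.Set.ofList ["spectral_extractor", "mfcc_extractor", "chroma_extractor"],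
   PySem.Set.ofList ["clap_extractor", "advanced_embeddings_extractor"],
   PySem.Set.ofList ["asr_extractor"]]

-- 'for group in compatible_groups: if all(...): return True' (early return)
def pvLoopA : List (PySem.Set String) → List String → Bool
  | [], _ => false
  | g :: rest, ns => if ns.all (fun n => PySem.Set.contains g n) then true else pvLoopA rest ns

def can_batch_extractors_py (extractor_names : List String) : Bool :=
  pvLoopA pvGroupsA extractor_names

-- ===== PORT B =====
def pvGroupsB : List (List String) :=
  [["spectral_extractor", "mfcc_extractor", "chroma_extractor"],
   ["clap_extractor", "advanced_embeddings_extractor"],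
   ["asr_extractor"]]

-- group_of = {name: i for i, group in enumerate(_GROUPS) for name in group}
def pvGroupOf : PySem.Dict String Int :=
  (PySem.List.enumerate pvGroupsB).foldl
    (fun d p => p.2.foldl (fun d n => d.insert n p.1) d)
    PySem.Dict.empty

-- the single pass over the names, tracking the first group id seen
def pvLoopB : List String → Option Int → Bool
  | [], _ => true
  | n :: rest, cur =>
    match PySem.Dict.get? pvGroupOf n with
    | none => false
    | some g =>
      match cur with
      | none => pvLoopB rest (some g)
      | some c => if c ≠ g then false else pvLoopB rest (some c)

def can_batch_extractors_py_alt (extractor_names : List String) : Bool :=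
  pvLoopB extractor_names none

-- ===== PRECONDITION & SPEC =====
def Spec_can_batch_extractors_py (extractor_names : List String) (out : Bool) : Prop := out = can_batch_extractors_py_alt extractor_names
instance (extractor_names : List String) (out : Bool) : Decidable (Spec_can_batch_extractors_py extractor_names out) := by unfold Spec_can_batch_extractors_py; infer_instance

-- ===== CLAIM (what is proved, stated in full; the proofs are below) =====
def Claim_equal_can_batch_extractors_py : Prop := ∀ (extractor_names : List String), Dom_can_batch_extractors_py extractor_names → Spec_can_batch_extractors_py extractor_names (can_batch_extractors_py extractor_names)

-- ===== LEMMAS AND PROOFS =====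

-- abbreviations for the three membership tests A uses
def pvM1 (n : String) : Bool := PySem.Set.contains (PySem.Set.ofList ["spectral_extractor", "mfcc_extractor", "chroma_extractor"]) n
def pvM2 (n : String) : Bool := PySem.Set.contains (PySem.Set.ofList ["clap_extractor", "advanced_embeddings_extractor"]) n
def pvM3 (n : String) : Bool := PySem.Set.contains (PySem.Set.ofList ["asr_extractor"]) n

-- per-name case analysis: the reverse dict agrees with the three membership tests
theorem pvGid_cases (n : String) :
    (PySem.Dict.get? pvGroupOf n = some 0 ∧ pvM1 n = true ∧ pvM2 n = false ∧ pvM3 n = false) ∨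
    (PySem.Dict.get? pvGroupOf n = some 1 ∧ pvM1 n = false ∧ pvM2 n = true ∧ pvM3 n = false) ∨
    (PySem.Dict.get? pvGroupOf n = some 2 ∧ pvM1 n = false ∧ pvM2 n = false ∧ pvM3 n = true) ∨
    (PySem.Dict.get? pvGroupOf n = none ∧ pvM1 n = false ∧ pvM2 n = false ∧ pvM3 n = false) := by
  by_cases h1 : n = "spectral_extractor"; · subst h1; left; decide
  by_cases h2 : n = "mfcc_extractor"; · subst h2; left; decide
  by_cases h3 : n = "chroma_extractor"; · subst h3; left; decide
  by_cases h4 : n = "clap_extractor"; · subst h4; right; left; decide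
  by_cases h5 : n = "advanced_embeddings_extractor"; · subst h5; right; left; decide
  by_cases h6 : n = "asr_extractor"; · subst h6; right; right; left; decide
  right; right; right
  refine ⟨?_, ?_, ?_, ?_⟩ <;>
    simp [pvGroupOf, pvGroupsB, pvM1, pvM2, pvM3, PySem.Set.contains, PySem.Set.ofList,
      PySem.Dict.get?, PySem.List.enumerate, PySem.Dict.insert, PySem.Dict.empty,
      Ne.symm h1, Ne.symm h2, Ne.symm h3, Ne.symm h4, Ne.symm h5, Ne.symm h6,
      h1, h2, h3, h4, h5, h6]

theorem pvLoopB_some0 (ns : List String) : pvLoopB ns (some 0) = ns.all pvM1 := by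
  induction ns with
  | nil => rfl
  | cons n rest ih =>
    rcases pvGid_cases n with ⟨hg, h1, h2, h3⟩ | ⟨hg, h1, h2, h3⟩ | ⟨hg, h1, h2, h3⟩ | ⟨hg, h1, h2, h3⟩ <;>
      simp [pvLoopB, hg, h1, h2, h3, ih]

theorem pvLoopB_some1 (ns : List String) : pvLoopB ns (some 1) = ns.all pvM2 := by
  induction ns with
  | nil => rfl
  | cons n rest ih =>
    rcases pvGid_cases n with ⟨hg, h1, h2, h3⟩ | ⟨hg, h1, h2, h3⟩ | ⟨hg, h1, h2, h3⟩ | ⟨hg, h1, h2, h3⟩ <;>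
      simp [pvLoopB, hg, h1, h2, h3, ih]

theorem pvLoopB_some2 (ns : List String) : pvLoopB ns (some 2) = ns.all pvM3 := by
  induction ns with
  | nil => rfl
  | cons n rest ih =>
    rcases pvGid_cases n with ⟨hg, h1, h2, h3⟩ | ⟨hg, h1, h2, h3⟩ | ⟨hg, h1, h2, h3⟩ | ⟨hg, h1, h2, h3⟩ <;>
      simp [pvLoopB, hg, h1, h2, h3, ih]

theorem pvLoopB_none (ns : List String) :
    pvLoopB ns none = (ns.all pvM1 || ns.all pvM2 || ns.all pvM3) := by
  induction ns with
  | nil => rfl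
  | cons n rest ih =>
    rcases pvGid_cases n with ⟨hg, h1, h2, h3⟩ | ⟨hg, h1, h2, h3⟩ | ⟨hg, h1, h2, h3⟩ | ⟨hg, h1, h2, h3⟩ <;>
      simp [pvLoopB, hg, h1, h2, h3, pvLoopB_some0, pvLoopB_some1, pvLoopB_some2]

theorem pvA_eq (ns : List String) :
    can_batch_extractors_py ns = (ns.all pvM1 || ns.all pvM2 || ns.all pvM3) := by
  simp only [can_batch_extractors_py, pvGroupsA, pvLoopA]
  have e1 : (ns.all fun n => PySem.Set.contains (PySem.Set.ofList ["spectral_extractor", "mfcc_extractor", "chroma_extractor"]) n) = ns.all pvM1 := rfl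
  have e2 : (ns.all fun n => PySem.Set.contains (PySem.Set.ofList ["clap_extractor", "advanced_embeddings_extractor"]) n) = ns.all pvM2 := rfl
  have e3 : (ns.all fun n => PySem.Set.contains (PySem.Set.ofList ["asr_extractor"]) n) = ns.all pvM3 := rfl
  rw [e1, e2, e3]
  split_ifs with h1 h2 h3 <;> simp_all

-- ===== VERDICT (by name: the statement is the Claim_ definition above) =====
theorem can_batch_extractors_py_spec : Claim_equal_can_batch_extractors_py := by
  intro ns _
  unfold Spec_can_batch_extractors_py can_batch_extractors_py_alt
  rw [pvA_eq, pvLoopB_none]
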